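-- pv_equiv track=rewrite | github.com/eliottcassidy2000/math | 04-computation/vandermonde_sigma_connection.py | count_disjoint_cycles
-- ===== SOURCE A (Python) =====
-- from collections import defaultdict
--
-- def count_disjoint_cycles(A, n):
--     cycles = []
--     seen = set()
--     def find_cycles(path, start, used):
--         last = path[-1]
--         length = len(path)
--         if length >= 3 and length % 2 == 1 and A[last][start]:
--             normalized = min(path[i:] + path[:i] for i in range(length))
--             key = tuple(normalized)
--             if key not in seen:
--                 seen.add(key)
--                 cycles.append(frozenset(path))
--         if length >= n:
--             return
--         for v in range(n):
--             if v not in used and A[last][v]: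
--                 find_cycles(path + [v], start, used | {v})
--     for start in range(n):
--         find_cycles([start], start, {start})
--
--     alpha = defaultdict(int)
--     def count_collections(idx, used, k):
--         if k > 0:
--             alpha[k] += 1
--         for j in range(idx, len(cycles)):
--             if not (cycles[j] & used):
--                 count_collections(j+1, used | cycles[j], k+1)
--     count_collections(0, frozenset(), 0)
--     return dict(alpha)
-- ===== SOURCE B (Python) =====
-- def count_disjoint_cycles(A, n):
--     # Fully iterative re-decomposition: both phases use explicit LIFO stacks
--     # instead of recursion.  Phase 1 runs the whole cycle search (all starts)
--     # on one stack of (path, start, used) frames; phase 2 counts disjoint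
--     # collections with a worklist of (remaining-cycles, used, size) frames.
--     cycles = []
--     seen = set()
--     stack = [([s], s, frozenset([s])) for s in reversed(range(n))]
--     while stack:
--         path, start, used = stack.pop()
--         last = path[-1]
--         L = len(path)
--         if L >= 3 and L % 2 == 1 and A[last][start]:
--             key = tuple(min(path[i:] + path[:i] for i in range(L)))
--             if key not in seen:
--                 seen.add(key)
--                 cycles.append(frozenset(path))
--         if L < n:
--             for v in reversed(range(n)):
--                 if v not in used and A[last][v]:
--                     stack.append((path + [v], start, used | {v}))
--
--     alpha = {}
--     work = [(cycles, frozenset(), 0)]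
--     while work:
--         rem, used, k = work.pop()
--         if k > 0:
--             alpha[k] = alpha.get(k, 0) + 1
--         for i in reversed(range(len(rem))):
--             if not (rem[i] & used):
--                 work.append((rem[i + 1:], used | rem[i], k + 1))
--     return alpha
-- ===== Notes on version B (the rewrite author's own statement) =====
-- stated objective: alternative
-- what changed: Both recursive passes are re-decomposed iteratively: phase 1's recursive DFS cycle enumeration becomes one explicit LIFO stack of (path, start, used) frames shared by all start vertices, and phase 2's recursive collection counting becomes a worklist of (remaining-cycles, used-vertices, size) frames tallied into a plain dict.
-- outside the precondition, e.g. on count_disjoint_cycles([], 1): A returns {}, B returns {}; on count_disjoint_cycles([[1, 1], [1]], 2): A returns {}, B returns {}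
import Mathlib
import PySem

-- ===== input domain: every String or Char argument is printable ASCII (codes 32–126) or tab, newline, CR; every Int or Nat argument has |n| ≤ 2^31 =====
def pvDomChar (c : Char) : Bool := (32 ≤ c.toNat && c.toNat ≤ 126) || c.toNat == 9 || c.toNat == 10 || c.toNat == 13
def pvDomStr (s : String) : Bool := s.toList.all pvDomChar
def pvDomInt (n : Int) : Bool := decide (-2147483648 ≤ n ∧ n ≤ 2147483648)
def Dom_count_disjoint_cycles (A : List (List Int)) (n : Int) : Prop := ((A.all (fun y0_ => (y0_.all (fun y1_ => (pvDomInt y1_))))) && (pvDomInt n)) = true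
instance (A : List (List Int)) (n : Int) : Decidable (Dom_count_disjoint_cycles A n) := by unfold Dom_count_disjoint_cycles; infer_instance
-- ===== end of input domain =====

-- B replaces both recursive passes by explicit LIFO stacks (one frame stack for
-- the whole cycle search, a worklist for the collection count); objective:
-- alternative decomposition, same return value.

-- ===== shared small helpers (same Python expressions occur in A and B) =====
-- Matrix entry A[i][j] (total form; Pre_ guarantees the indices probed are in range).
def pvEntry (A : List (List Int)) (i j : Int) : Int :=
  PySem.List.pyGetD (PySem.List.pyGetD A i []) j 0

-- Python's '<' on lists of ints (lexicographic).
def pvLexLt : List Int → List Int → Bool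
  | [], [] => false
  | [], _ :: _ => true
  | _ :: _, [] => false
  | a :: as, b :: bs => if a < b then true else if b < a then false else pvLexLt as bs

-- min(path[i:] + path[:i] for i in range(len(path)))  (first minimal element)
def pvMinRot (path : List Int) : List Int :=
  match (List.range path.length).map (fun i => path.drop i ++ path.take i) with
  | [] => []
  | r :: rs => rs.foldl (fun m x => if pvLexLt x m then x else m) r

-- alpha[k] += 1 (A: defaultdict(int); B: alpha[k] = alpha.get(k, 0) + 1 — same update)
def pvBump (α : PySem.Dict Int Int) (k : Int) : PySem.Dict Int Int :=
  PySem.Dict.insert α k (PySem.Dict.getD α k 0 + 1)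

-- ===== PORT A =====
-- find_cycles: state = (seen, cycles); fuel (= n.toNat at the root) is a pure
-- totality guard, never exhausted on the recursion Python performs.
def pvFindCycles (A : List (List Int)) (n : Int) :
    Nat → List Int → Int → PySem.Set Int →
    PySem.Set (List Int) × List (PySem.Set Int) →
    PySem.Set (List Int) × List (PySem.Set Int)
  | fuel, path, start, used, st =>
    let last := (PySem.List.pyGet? path (-1)).getD 0
    let length := path.length
    let st :=
      if 3 ≤ length ∧ length % 2 = 1 ∧ pvEntry A last start ≠ 0 then
        let normalized := pvMinRot path
        if PySem.Set.contains st.1 normalized then st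
        else (PySem.Set.add st.1 normalized, st.2 ++ [PySem.Set.ofList path])
      else st
    if n ≤ (length : Int) then st
    else
      match fuel with
      | 0 => st
      | fuel + 1 =>
        (PySem.List.pyRange 0 n 1).foldl (fun st v =>
          if ¬ PySem.Set.contains used v ∧ pvEntry A last v ≠ 0 then
            pvFindCycles A n fuel (path ++ [v]) start (PySem.Set.add used v) st
          else st) st

-- the 'for start in range(n): find_cycles([start], start, {start})' driver
def pvPhase1 (A : List (List Int)) (n : Int) : List (PySem.Set Int) :=
  ((PySem.List.pyRange 0 n 1).foldl
    (fun st start => pvFindCycles A n n.toNat [start] start (PySem.Set.ofList [start]) st)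
    (PySem.Set.empty, [])).2

-- count_collections (recursive, as in A); pvCCLoop is its inner 'for j' loop,
-- walking the remaining suffix of cycles.
mutual
def pvCC : List (PySem.Set Int) → PySem.Set Int → Int → PySem.Dict Int Int → PySem.Dict Int Int
  | rem, used, k, α =>
    let α := if 0 < k then pvBump α k else α
    pvCCLoop rem used k α
  termination_by rem _ _ _ => (rem.length, 1)

def pvCCLoop : List (PySem.Set Int) → PySem.Set Int → Int → PySem.Dict Int Int → PySem.Dict Int Int
  | [], _, _, α => α
  | c :: rest, used, k, α =>
    let α := if (PySem.Set.inter c used).isEmpty then pvCC rest (PySem.Set.union used c) (k + 1) α else α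
    pvCCLoop rest used k α
  termination_by l _ _ _ => (l.length, 0)
end

def count_disjoint_cycles (A : List (List Int)) (n : Int) : List (Int × Int) :=
  (pvCC (pvPhase1 A n) PySem.Set.empty 0 PySem.Dict.empty).items

-- ===== PORT B =====
-- phase-1 frame: (fuel, path, start, used); fuel is the same pure totality
-- guard as in A's port (Python B needs none).  The Lean list's head is the
-- Python stack's top; Python pushes children in reversed order, so popping
-- yields them in increasing v order — pvKids builds exactly that list.
def pvKids (A : List (List Int)) (fuel : Nat) (path : List Int) (start : Int)
    (used : PySem.Set Int) :
    List Int → List (Nat × List Int × Int × PySem.Set Int)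
  | [] => []
  | v :: vs =>
    if ¬ PySem.Set.contains used v ∧ pvEntry A ((PySem.List.pyGet? path (-1)).getD 0) v ≠ 0 then
      (fuel, path ++ [v], start, PySem.Set.add used v) :: pvKids A fuel path start used vs
    else pvKids A fuel path start used vs

def pvKidsOf (A : List (List Int)) (n : Int) (f : Nat × List Int × Int × PySem.Set Int) :
    List (Nat × List Int × Int × PySem.Set Int) :=
  if n ≤ (f.2.1.length : Int) then []
  else match f.1 with
    | 0 => []
    | fuel + 1 => pvKids A fuel f.2.1 f.2.2.1 f.2.2.2 (PySem.List.pyRange 0 n 1)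

-- the cycle-check body executed when a frame is popped
def pvStep (A : List (List Int)) (f : Nat × List Int × Int × PySem.Set Int)
    (st : PySem.Set (List Int) × List (PySem.Set Int)) :
    PySem.Set (List Int) × List (PySem.Set Int) :=
  let path := f.2.1
  let last := (PySem.List.pyGet? path (-1)).getD 0
  let length := path.length
  if 3 ≤ length ∧ length % 2 = 1 ∧ pvEntry A last f.2.2.1 ≠ 0 then
    let normalized := pvMinRot path
    if PySem.Set.contains st.1 normalized then st
    else (PySem.Set.add st.1 normalized, st.2 ++ [PySem.Set.ofList path])
  else st

def pvMeasure1 (b : Nat) (fs : List (Nat × List Int × Int × PySem.Set Int)) : Nat :=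
  (fs.map (fun f => b ^ f.1)).sum

theorem pvKids_measure (A : List (List Int)) (b fuel : Nat) (path : List Int) (start : Int)
    (used : PySem.Set Int) (l : List Int) :
    pvMeasure1 b (pvKids A fuel path start used l) ≤ l.length * b ^ fuel := by
  induction l with
  | nil => simp [pvKids, pvMeasure1]
  | cons v vs ih =>
    simp only [pvKids]
    split
    · simp only [pvMeasure1, List.map_cons, List.sum_cons, List.length_cons, Nat.succ_mul] at *
      omega
    · simp only [pvMeasure1, List.length_cons, Nat.succ_mul] at *
      omega

theorem pvKidsOf_measure (A : List (List Int)) (n : Int)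
    (f : Nat × List Int × Int × PySem.Set Int)
    (hb : (PySem.List.pyRange 0 n 1).length < n.toNat + 1) :
    pvMeasure1 (n.toNat + 1) (pvKidsOf A n f) < (n.toNat + 1) ^ f.1 := by
  unfold pvKidsOf
  split
  · simp [pvMeasure1]
  · match hf : f.1 with
    | 0 => simp [pvMeasure1]
    | fuel + 1 =>
      have h := pvKids_measure A (n.toNat + 1) fuel f.2.1 f.2.2.1 f.2.2.2 (PySem.List.pyRange 0 n 1)
      have hp : 0 < (n.toNat + 1) ^ fuel := by positivity
      calc pvMeasure1 (n.toNat + 1) (pvKids A fuel f.2.1 f.2.2.1 f.2.2.2 (PySem.List.pyRange 0 n 1))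
          ≤ (PySem.List.pyRange 0 n 1).length * (n.toNat + 1) ^ fuel := h
        _ < (n.toNat + 1) * (n.toNat + 1) ^ fuel := by
            exact Nat.mul_lt_mul_of_lt_of_le hb (le_refl _) hp
        _ = (n.toNat + 1) ^ (fuel + 1) := by ring

theorem pvRange_len (n : Int) : (PySem.List.pyRange 0 n 1).length < n.toNat + 1 := by
  simp [PySem.List.pyRange]; split <;> omega

-- the 'while stack' loop of phase 1
def pvStack1 (A : List (List Int)) (n : Int) :
    List (Nat × List Int × Int × PySem.Set Int) →
    PySem.Set (List Int) × List (PySem.Set Int) →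
    PySem.Set (List Int) × List (PySem.Set Int)
  | [], st => st
  | f :: fs, st => pvStack1 A n (pvKidsOf A n f ++ fs) (pvStep A f st)
  termination_by fs _ => pvMeasure1 (n.toNat + 1) fs
  decreasing_by
    have h := pvKidsOf_measure A n f (pvRange_len n)
    simp only [pvMeasure1, List.map_append, List.sum_append, List.map_cons, List.sum_cons] at *
    omega

-- '[([s], s, frozenset([s])) for s in reversed(range(n))]' popped from the end
-- = this list read head-first
def pvInitFrames (n : Int) : List (Nat × List Int × Int × PySem.Set Int) :=
  (PySem.List.pyRange 0 n 1).map (fun s => (n.toNat, [s], s, PySem.Set.ofList [s]))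

def pvPhase1B (A : List (List Int)) (n : Int) : List (PySem.Set Int) :=
  (pvStack1 A n (pvInitFrames n) (PySem.Set.empty, [])).2

-- phase-2 worklist frame: (remaining cycles, used vertices, current size)
def pvChildren : List (PySem.Set Int) → PySem.Set Int → Int →
    List (List (PySem.Set Int) × PySem.Set Int × Int)
  | [], _, _ => []
  | c :: rest, used, k =>
    if (PySem.Set.inter c used).isEmpty then
      (rest, PySem.Set.union used c, k + 1) :: pvChildren rest used k
    else pvChildren rest used k

def pvMeasure (st : List (List (PySem.Set Int) × PySem.Set Int × Int)) : Nat :=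
  (st.map (fun f => 2 ^ f.1.length)).sum

theorem pvChildren_measure (rem : List (PySem.Set Int)) (used : PySem.Set Int) (k : Int) :
    pvMeasure (pvChildren rem used k) < 2 ^ rem.length := by
  induction rem generalizing used k with
  | nil => simp [pvChildren, pvMeasure]
  | cons c rest ih =>
    simp only [pvChildren]
    have h := ih used k
    have hp : (2:Nat) ^ (c :: rest).length = 2 ^ rest.length + 2 ^ rest.length := by
      simp [List.length_cons, pow_succ]; ring
    split
    · simp only [pvMeasure, List.map_cons, List.sum_cons] at *
      omega
    · simp only [pvMeasure] at *
      omega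

-- the 'while work' loop of phase 2
def pvStackRun : List (List (PySem.Set Int) × PySem.Set Int × Int) → PySem.Dict Int Int → PySem.Dict Int Int
  | [], α => α
  | (rem, used, k) :: st, α =>
    let α := if 0 < k then pvBump α k else α
    pvStackRun (pvChildren rem used k ++ st) α
  termination_by st _ => pvMeasure st
  decreasing_by
    have h := pvChildren_measure rem used k
    simp only [pvMeasure, List.map_append, List.sum_append, List.map_cons, List.sum_cons] at *
    omega

def count_disjoint_cycles_alt (A : List (List Int)) (n : Int) : List (Int × Int) :=
  (pvStackRun [(pvPhase1B A n, PySem.Set.empty, 0)] PySem.Dict.empty).items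

-- ===== PRECONDITION & SPEC =====
-- Pre_ requires the first n rows to exist and have length ≥ n; on smaller or
-- ragged matrices Python raises IndexError, except for degenerate cases (n ≤ 1,
-- or ragged rows whose missing entries are never probed) where A returns {} and
-- B returns {} as well — these are excluded with A's ordinary crashes.
def Pre_count_disjoint_cycles (A : List (List Int)) (n : Int) : Prop :=
  n ≤ (A.length : Int) ∧ ∀ row ∈ A.take n.toNat, n ≤ (row.length : Int)
instance (A : List (List Int)) (n : Int) : Decidable (Pre_count_disjoint_cycles A n) := by
  unfold Pre_count_disjoint_cycles; infer_instance

def pvWitness_count_disjoint_cycles : List (List Int) × Int :=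
  ([[0, 1, 1], [1, 0, 1], [1, 1, 0]], 3)

def Spec_count_disjoint_cycles (A : List (List Int)) (n : Int) (out : List (Int × Int)) : Prop := out = count_disjoint_cycles_alt A n
instance (A : List (List Int)) (n : Int) (out : List (Int × Int)) : Decidable (Spec_count_disjoint_cycles A n out) := by unfold Spec_count_disjoint_cycles; infer_instance

-- ===== CLAIM (what is proved, stated in full; the proofs are below) =====
def Claim_equal_count_disjoint_cycles : Prop := ∀ (A : List (List Int)) (n : Int), Dom_count_disjoint_cycles A n → Pre_count_disjoint_cycles A n → Spec_count_disjoint_cycles A n (count_disjoint_cycles A n)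

-- ===== LEMMAS AND PROOFS =====
-- A's inner 'for v' loop is the fold of find_cycles over the kid frames.
theorem pvFold_eq_kids (A : List (List Int)) (n : Int) (fuel : Nat) (path : List Int)
    (start : Int) (used : PySem.Set Int) (l : List Int)
    (st : PySem.Set (List Int) × List (PySem.Set Int)) :
    l.foldl (fun st v =>
        if ¬ PySem.Set.contains used v ∧ pvEntry A ((PySem.List.pyGet? path (-1)).getD 0) v ≠ 0 then
          pvFindCycles A n fuel (path ++ [v]) start (PySem.Set.add used v) st
        else st) st
      = (pvKids A fuel path start used l).foldl
          (fun st f => pvFindCycles A n f.1 f.2.1 f.2.2.1 f.2.2.2 st) st := by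
  induction l generalizing st with
  | nil => simp [pvKids]
  | cons v vs ih =>
    simp only [List.foldl_cons, pvKids]
    split
    · rw [List.foldl_cons]; exact ih _
    · exact ih _

-- one step of the recursion = pvStep followed by folding over the frame's kids
theorem pvFindCycles_eq_step (A : List (List Int)) (n : Int) (fuel : Nat) (path : List Int)
    (start : Int) (used : PySem.Set Int)
    (st : PySem.Set (List Int) × List (PySem.Set Int)) :
    pvFindCycles A n fuel path start used st =
      (pvKidsOf A n (fuel, path, start, used)).foldl
        (fun st f => pvFindCycles A n f.1 f.2.1 f.2.2.1 f.2.2.2 st)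
        (pvStep A (fuel, path, start, used) st) := by
  rw [pvFindCycles.eq_def]
  unfold pvKidsOf pvStep
  simp only
  split
  · simp
  · match fuel with
    | 0 => simp
    | fuel + 1 =>
      simp only
      exact pvFold_eq_kids A n fuel path start used (PySem.List.pyRange 0 n 1) _

-- the phase-1 stack run is the fold of find_cycles over the stacked frames
theorem pvStack1_eq_foldl (A : List (List Int)) (n : Int)
    (fs : List (Nat × List Int × Int × PySem.Set Int))
    (st : PySem.Set (List Int) × List (PySem.Set Int)) :
    pvStack1 A n fs st =
      fs.foldl (fun st f => pvFindCycles A n f.1 f.2.1 f.2.2.1 f.2.2.2 st) st := by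
  induction fs, st using pvStack1.induct A n with
  | case1 st => simp [pvStack1]
  | case2 f fs st ih =>
    rw [pvStack1, ih, List.foldl_append, List.foldl_cons]
    congr 1
    exact (pvFindCycles_eq_step A n f.1 f.2.1 f.2.2.1 f.2.2.2 st).symm

-- both phase-1 drivers produce the same cycles list
theorem pvPhase1B_eq (A : List (List Int)) (n : Int) : pvPhase1B A n = pvPhase1 A n := by
  unfold pvPhase1B pvPhase1 pvInitFrames
  rw [pvStack1_eq_foldl, List.foldl_map]

-- A's inner 'for j' loop is the fold of count_collections over the child frames.
theorem pvCCLoop_eq_foldl (rem : List (PySem.Set Int)) (used : PySem.Set Int) (k : Int)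
    (α : PySem.Dict Int Int) :
    pvCCLoop rem used k α =
      (pvChildren rem used k).foldl (fun α f => pvCC f.1 f.2.1 f.2.2 α) α := by
  induction rem generalizing α with
  | nil => simp [pvCCLoop, pvChildren]
  | cons c rest ih =>
    simp only [pvCCLoop, pvChildren]
    split
    · simp [ih]
    · simp [ih]

-- the phase-2 worklist run is the fold of count_collections over the stacked frames
theorem pvStackRun_eq_foldl (st : List (List (PySem.Set Int) × PySem.Set Int × Int))
    (α : PySem.Dict Int Int) :
    pvStackRun st α = st.foldl (fun α f => pvCC f.1 f.2.1 f.2.2 α) α := by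
  induction st, α using pvStackRun.induct with
  | case1 α => simp [pvStackRun]
  | case2 rem used k st α α2 ih =>
    simp only [pvStackRun]
    have h2 : α2 = if 0 < k then pvBump α k else α := by simp [α2]
    rw [h2] at ih
    rw [ih, List.foldl_append, List.foldl_cons]
    congr 1
    rw [show pvCC rem used k α = pvCCLoop rem used k (if 0 < k then pvBump α k else α) from by
      rw [pvCC]]
    rw [pvCCLoop_eq_foldl]

-- ===== VERDICT (by name: the statement is the Claim_ definition above) =====
theorem count_disjoint_cycles_spec : Claim_equal_count_disjoint_cycles := by
  intro A n _ _
  unfold Spec_count_disjoint_cycles count_disjoint_cycles count_disjoint_cycles_alt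
  rw [pvPhase1B_eq, pvStackRun_eq_foldl, List.foldl_cons, List.foldl_nil]
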